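-- pv_equiv track=rewrite | github.com/Yuyi-hao/fiblock | main.py | get_block_colors
-- ===== SOURCE A (Python) =====
-- def get_block_colors(hours, minutes):
--     res = ["white"]*5
--     hours = hours%12
--     minutes = minutes - (minutes%5)
--
--     fibonacci_series = [5, 3, 2, 1, 1]
--
--     for idx, value in enumerate(fibonacci_series):
--         if hours >= value:
--             res[-(idx+1)] = "red"
--             hours -= value
--
--     for idx, value in enumerate(fibonacci_series):
--         if minutes >= value*5:
--             if res[-(idx+1)] != "white":
--                 res[-(idx+1)] = "green"
--             else:
--                 res[-(idx+1)] = "blue"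
--             minutes -= value*5
--
--     return res
-- ===== SOURCE B (Python) =====
-- # Table-driven: the 12 possible hour/minute values 0..11 (plus the saturated 12)
-- # each have a fixed block pattern, precomputed as 5-bit masks; colors come from
-- # a 4-entry color table indexed by the two bits per block.
-- MASKS = [0, 2, 4, 8, 10, 16, 18, 20, 24, 26, 28, 30, 31]
-- COLORS = ["white", "red", "blue", "green"]
--
-- def get_block_colors(hours, minutes):
--     q = minutes // 5
--     hmask = MASKS[hours % 12]
--     mmask = MASKS[max(0, min(q, 12))]
--     return [COLORS[(hmask >> i & 1) | ((mmask >> i & 1) << 1)] for i in range(5)]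
-- ===== Notes on version B (the rewrite author's own statement) =====
-- stated objective: alternative
-- what changed: Replaces A's two greedy-subtraction loops with in-place list mutation by a precomputed 13-entry bitmask lookup table (one mask per value 0..12, minutes value clamped to that range) and a 4-entry color table indexed by the two bits of each block.
import Mathlib
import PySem

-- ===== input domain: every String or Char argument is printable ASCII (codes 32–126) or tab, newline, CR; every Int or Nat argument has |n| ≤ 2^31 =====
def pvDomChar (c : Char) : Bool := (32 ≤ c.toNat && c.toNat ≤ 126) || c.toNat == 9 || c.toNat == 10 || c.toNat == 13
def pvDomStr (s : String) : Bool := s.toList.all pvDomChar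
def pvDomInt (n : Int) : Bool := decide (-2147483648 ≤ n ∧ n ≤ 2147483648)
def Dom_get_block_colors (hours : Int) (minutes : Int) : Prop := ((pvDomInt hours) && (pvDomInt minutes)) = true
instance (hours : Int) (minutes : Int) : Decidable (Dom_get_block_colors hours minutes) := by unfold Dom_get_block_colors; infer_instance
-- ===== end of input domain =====

-- B replaces A's two greedy-subtraction mutation loops by a precomputed bitmask
-- lookup table plus a color table (objective: alternative).

-- ===== PORT A =====
-- Python res[-(idx+1)] on a 5-element list = index 5-(idx+1) = 4-idx (idx ∈ 0..4, always in range).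
def get_block_colors (hours : Int) (minutes : Int) : List String :=
  let res : List String := ["white", "white", "white", "white", "white"]
  let hours := PySem.Int.mod hours 12
  let minutes := minutes - PySem.Int.mod minutes 5
  let fibonacci_series : List Int := [5, 3, 2, 1, 1]
  let st1 := (PySem.List.enumerate fibonacci_series).foldl
    (fun (st : List String × Int) p =>
      if st.2 ≥ p.2 then (st.1.set (4 - p.1.toNat) "red", st.2 - p.2) else st)
    (res, hours)
  let st2 := (PySem.List.enumerate fibonacci_series).foldl
    (fun (st : List String × Int) p =>
      if st.2 ≥ p.2 * 5 then
        (st.1.set (4 - p.1.toNat)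
          (if st.1.getD (4 - p.1.toNat) "" ≠ "white" then "green" else "blue"),
         st.2 - p.2 * 5)
      else st)
    (st1.1, minutes)
  st2.1

-- ===== PORT B =====
-- Precomputed masks: bit i of pvMasks[v] says block i is lit for value v (v clamped to 0..12).
def pvMasks : List Nat := [0, 2, 4, 8, 10, 16, 18, 20, 24, 26, 28, 30, 31]
def pvColors : List String := ["white", "red", "blue", "green"]

-- Indices into pvMasks/pvColors are always in range (0..12 resp. 0..3), so getD's default is never used.
def get_block_colors_alt (hours : Int) (minutes : Int) : List String :=
  let q := PySem.Int.floordiv minutes 5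
  let hmask := pvMasks.getD (PySem.Int.mod hours 12).toNat 0
  let mmask := pvMasks.getD (max 0 (min q 12)).toNat 0
  (List.range 5).map (fun i =>
    pvColors.getD (((hmask >>> i) &&& 1) ||| (((mmask >>> i) &&& 1) <<< 1)) "")

-- ===== PRECONDITION & SPEC =====
def Spec_get_block_colors (hours : Int) (minutes : Int) (out : List String) : Prop := out = get_block_colors_alt hours minutes
instance (hours : Int) (minutes : Int) (out : List String) : Decidable (Spec_get_block_colors hours minutes out) := by unfold Spec_get_block_colors; infer_instance

-- ===== CLAIM (what is proved, stated in full; the proofs are below) =====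
def Claim_equal_get_block_colors : Prop := ∀ (hours : Int) (minutes : Int), Dom_get_block_colors hours minutes → Spec_get_block_colors hours minutes (get_block_colors hours minutes)

-- ===== LEMMAS AND PROOFS =====

-- A's two loops, extracted so the main proof can talk about them (definitionally equal to A's lets).
def pvLoop1 (h : Int) : List String :=
  ((PySem.List.enumerate ([5,3,2,1,1] : List Int)).foldl
    (fun (st : List String × Int) p =>
      if st.2 ≥ p.2 then (st.1.set (4 - p.1.toNat) "red", st.2 - p.2) else st)
    (["white","white","white","white","white"], h)).1

def pvLoop2 (res : List String) (m : Int) : List String :=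
  ((PySem.List.enumerate ([5,3,2,1,1] : List Int)).foldl
    (fun (st : List String × Int) p =>
      if st.2 ≥ p.2 * 5 then
        (st.1.set (4 - p.1.toNat)
          (if st.1.getD (4 - p.1.toNat) "" ≠ "white" then "green" else "blue"),
         st.2 - p.2 * 5)
      else st)
    (res, m)).1

-- B's body as a function of the two reduced values.
def pvAltCore (h q : Int) : List String :=
  let hmask := pvMasks.getD h.toNat 0
  let mmask := pvMasks.getD (max 0 (min q 12)).toNat 0
  (List.range 5).map (fun i =>
    pvColors.getD (((hmask >>> i) &&& 1) ||| (((mmask >>> i) &&& 1) <<< 1)) "")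

theorem A_as_loops (hours minutes : Int) :
    get_block_colors hours minutes
      = pvLoop2 (pvLoop1 (PySem.Int.mod hours 12)) (minutes - PySem.Int.mod minutes 5) := rfl

theorem B_as_core (hours minutes : Int) :
    get_block_colors_alt hours minutes
      = pvAltCore (PySem.Int.mod hours 12) (PySem.Int.floordiv minutes 5) := rfl

-- Clamping is idempotent, so the core only depends on q through its clamp.
theorem altCore_clamp (h q c : Int) (hc : max 0 (min q 12) = c) :
    pvAltCore h q = pvAltCore h c := by
  unfold pvAltCore
  have : max 0 (min q 12) = max 0 (min c 12) := by omega
  rw [this]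

-- Saturation of A's minutes loop (over the enumerated list, conditions ≥ value*5).
theorem loop2Fold_congr (l : List (Int × Int)) (res : List String) (m m' : Int)
    (hpos : ∀ p ∈ l, 1 ≤ p.2) (hm : 5 * (l.map (·.2)).sum ≤ m) (hm' : 5 * (l.map (·.2)).sum ≤ m') :
    (l.foldl (fun (st : List String × Int) p =>
      if st.2 ≥ p.2 * 5 then
        (st.1.set (4 - p.1.toNat)
          (if st.1.getD (4 - p.1.toNat) "" ≠ "white" then "green" else "blue"),
         st.2 - p.2 * 5)
      else st) (res, m)).1
    = (l.foldl (fun (st : List String × Int) p =>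
      if st.2 ≥ p.2 * 5 then
        (st.1.set (4 - p.1.toNat)
          (if st.1.getD (4 - p.1.toNat) "" ≠ "white" then "green" else "blue"),
         st.2 - p.2 * 5)
      else st) (res, m')).1 := by
  induction l generalizing res m m' with
  | nil => rfl
  | cons p t ih =>
    have hs : ((p :: t).map (·.2)).sum = p.2 + (t.map (·.2)).sum := by
      simp [List.sum_cons]
    have ht : (0:Int) ≤ (t.map (·.2)).sum :=
      List.sum_nonneg (by
        intro x hx
        obtain ⟨y, hy, rfl⟩ := List.mem_map.mp hx
        exact le_trans (by norm_num) (hpos y (List.mem_cons_of_mem _ hy)))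
    simp only [List.foldl_cons]
    rw [if_pos (by omega : m ≥ p.2 * 5), if_pos (by omega : m' ≥ p.2 * 5)]
    exact ih _ (m - p.2 * 5) (m' - p.2 * 5)
      (fun x hx => hpos x (List.mem_cons_of_mem _ hx)) (by omega) (by omega)

theorem loop2_ge (res : List String) (m : Int) (h : 60 ≤ m) : pvLoop2 res m = pvLoop2 res 60 := by
  unfold pvLoop2
  simp only [PySem.List.enumerate_cons, PySem.List.enumerate_nil]
  rw [loop2Fold_congr _ _ m 60 (by decide) (by norm_num; omega) (by norm_num)]

theorem loop2_nonpos (res : List String) (m : Int) (hm : m ≤ 0) : pvLoop2 res m = res := by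
  simp only [pvLoop2, PySem.List.enumerate_cons, PySem.List.enumerate_nil, List.foldl_cons,
    List.foldl_nil]
  rw [if_neg (by omega : ¬ ((res, m).2 ≥ (5:Int) * 5))]
  rw [if_neg (by omega : ¬ ((res, m).2 ≥ (3:Int) * 5))]
  rw [if_neg (by omega : ¬ ((res, m).2 ≥ (2:Int) * 5))]
  rw [if_neg (by omega : ¬ ((res, m).2 ≥ (1:Int) * 5))]
  rw [if_neg (by omega : ¬ ((res, m).2 ≥ (1:Int) * 5))]

theorem main_eq (hours minutes : Int) :
    get_block_colors hours minutes = get_block_colors_alt hours minutes := by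
  rw [A_as_loops, B_as_core]
  have hq : minutes - PySem.Int.mod minutes 5 = 5 * PySem.Int.floordiv minutes 5 := by
    have := PySem.Int.floordiv_mul_add_mod minutes 5
    omega
  have hb : 0 ≤ PySem.Int.mod hours 12 ∧ PySem.Int.mod hours 12 < 12 := by
    have h1 := PySem.Int.mod_eq_emod_of_pos (a := hours) (b := 12) (by norm_num)
    exact ⟨h1 ▸ Int.emod_nonneg _ (by norm_num), h1 ▸ Int.emod_lt_of_pos _ (by norm_num)⟩
  rw [hq]
  generalize PySem.Int.mod hours 12 = h at hb ⊢
  generalize PySem.Int.floordiv minutes 5 = q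
  obtain ⟨h0, h1⟩ := hb
  interval_cases h <;>
  · by_cases hq0 : q ≤ 0
    · rw [loop2_nonpos _ _ (by omega), altCore_clamp _ _ 0 (by omega)]; decide
    · by_cases hq2 : 12 ≤ q
      · rw [loop2_ge _ _ (by omega), altCore_clamp _ _ 12 (by omega)]; decide
      · have h0q : 1 ≤ q := by omega
        have h1q : q ≤ 11 := by omega
        interval_cases q <;> decide

-- ===== VERDICT (by name: the statement is the Claim_ definition above) =====
theorem get_block_colors_spec : Claim_equal_get_block_colors := by
  intro hours minutes _
  exact main_eq hours minutes
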